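-- pv_equiv track=rewrite | github.com/pypi-data/pypi-mirror-178 | packages/formgram/formgram-0.0.6-py3-none-any.whl/formgram/formgram_procedures/utility/monotone/generator.py | apply_grouped_productions_to_word
-- ===== SOURCE A (Python) =====
-- def apply_grouped_productions_to_word(word, grouped_productions) -> set:
--     """return the set of words producible by applying any possible production on the given word
--
--     :param word:
--     :param grouped_productions:
--     :return:
--     """
--     output = set()
--     indices = range(len(word))
--     for start in indices:
--         for end in [index + 1 for index in indices if index >= start]:
--             subword = word[start:end]
--             if subword in grouped_productions:
--                 new_words = {
--                     word[:start] + replacement + word[end:]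
--                     for replacement in grouped_productions[subword]
--                 }
--                 output.update(new_words)
--     return output
-- ===== SOURCE B (Python) =====
-- def apply_grouped_productions_to_word(word, grouped_productions) -> set:
--     """return the set of words producible by applying any possible production on the given word
--
--     Instead of testing every one of the O(n^2) substrings against the production
--     dict, probe each start position only at the distinct key lengths.
--     """
--     lengths = sorted({len(key) for key in grouped_productions if key})
--     n = len(word)
--     output = set()
--     for start in range(n):
--         for length in lengths:
--             end = start + length
--             if end > n:
--                 break
--             subword = word[start:end]
--             if subword in grouped_productions:
--                 for replacement in grouped_productions[subword]:
--                     output.add(word[:start] + replacement + word[end:])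
--     return output
-- ===== Notes on version B (the rewrite author's own statement) =====
-- stated objective: faster
-- what changed: Instead of testing every one of the O(n^2) substrings of the word against the production dict, B precomputes the sorted distinct key lengths once and probes each start position only at those lengths, breaking out as soon as a length runs past the end of the word.
import Mathlib
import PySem

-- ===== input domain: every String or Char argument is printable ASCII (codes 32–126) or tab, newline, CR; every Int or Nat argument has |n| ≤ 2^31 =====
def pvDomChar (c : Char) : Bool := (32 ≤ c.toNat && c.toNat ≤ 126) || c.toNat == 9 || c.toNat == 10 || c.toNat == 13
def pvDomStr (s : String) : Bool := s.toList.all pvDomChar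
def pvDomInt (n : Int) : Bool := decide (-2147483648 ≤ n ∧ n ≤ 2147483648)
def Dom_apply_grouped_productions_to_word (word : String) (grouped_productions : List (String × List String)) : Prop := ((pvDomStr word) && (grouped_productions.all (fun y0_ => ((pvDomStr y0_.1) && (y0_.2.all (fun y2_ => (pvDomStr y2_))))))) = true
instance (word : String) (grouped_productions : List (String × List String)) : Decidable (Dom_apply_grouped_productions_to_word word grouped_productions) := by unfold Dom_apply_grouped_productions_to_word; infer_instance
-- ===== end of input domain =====

-- B probes each start position only at the sorted distinct key lengths instead of testing
-- all O(n^2) substrings against the production dict (objective: faster; same result set,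
-- in the same insertion order).

-- ===== PORT A =====
-- literal port of A: for start in range(n): for end in [i+1 for i in range(n) if i >= start]:
-- 'subword in dict' then 'dict[subword]' is the match on Dict.get? (membership ↔ isSome).
def apply_grouped_productions_to_word (word : String) (grouped_productions : List (String × List String)) : List String :=
  let w := word.toList
  let indices := PySem.List.pyRange 0 (PySem.Str.len word) 1
  indices.foldl (fun output start =>
    ((indices.filter (fun index => decide (start ≤ index))).map (fun index => index + 1)).foldl
      (fun output end_ =>
        let subword := String.ofList (PySem.List.slice w (some start) (some end_))
        match PySem.Dict.get? ⟨grouped_productions⟩ subword with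
        | some reps =>
            PySem.Set.update output (PySem.Set.ofList (reps.map (fun replacement =>
              String.ofList (PySem.List.slice w none (some start) ++ replacement.toList ++
                PySem.List.slice w (some end_) none))))
        | none => output)
      output)
    PySem.Set.empty

-- ===== PORT B =====
-- literal port of B (Source B): lengths = sorted({len(key) for key in gp if key}); the inner
-- 'if end > n: break' over the ascending lengths is the takeWhile.
def apply_grouped_productions_to_word_alt (word : String) (grouped_productions : List (String × List String)) : List String :=
  let w := word.toList
  let lengths : List Int :=
    PySem.List.sorted
      (PySem.Set.ofList (((grouped_productions.map Prod.fst).filter (fun key => !(key == ""))).map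
        (fun key => PySem.Str.len key)))
      (fun x => x) false
  let n := PySem.Str.len word
  (PySem.List.pyRange 0 n 1).foldl (fun output start =>
    (lengths.takeWhile (fun length => decide (start + length ≤ n))).foldl
      (fun output length =>
        let end_ := start + length
        let subword := String.ofList (PySem.List.slice w (some start) (some end_))
        match PySem.Dict.get? ⟨grouped_productions⟩ subword with
        | some reps =>
            reps.foldl (fun output replacement =>
              PySem.Set.add output (String.ofList (PySem.List.slice w none (some start) ++
                replacement.toList ++ PySem.List.slice w (some end_) none))) output
        | none => output)
      output)
    PySem.Set.empty

-- ===== PRECONDITION & SPEC =====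
def Spec_apply_grouped_productions_to_word (word : String) (grouped_productions : List (String × List String)) (out : List String) : Prop := out = apply_grouped_productions_to_word_alt word grouped_productions
instance (word : String) (grouped_productions : List (String × List String)) (out : List String) : Decidable (Spec_apply_grouped_productions_to_word word grouped_productions out) := by unfold Spec_apply_grouped_productions_to_word; infer_instance

-- ===== CLAIM (what is proved, stated in full; the proofs are below) =====
def Claim_equal_apply_grouped_productions_to_word : Prop := ∀ (word : String) (grouped_productions : List (String × List String)), Dom_apply_grouped_productions_to_word word grouped_productions → Spec_apply_grouped_productions_to_word word grouped_productions (apply_grouped_productions_to_word word grouped_productions)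

-- ===== LEMMAS AND PROOFS =====

-- the shared inner step: given start and an end position e, apply all productions for word[start:e]
def pvStep (w : List Char) (gp : List (String × List String)) (start : ℤ)
    (output : List String) (e : ℤ) : List String :=
  match PySem.Dict.get? ⟨gp⟩ (String.ofList (PySem.List.slice w (some start) (some e))) with
  | some reps =>
      reps.foldl (fun output replacement =>
        PySem.Set.add output (String.ofList (PySem.List.slice w none (some start) ++
          replacement.toList ++ PySem.List.slice w (some e) none))) output
  | none => output

-- the predicate "word[start:e] is a production key"
def pvP (w : List Char) (gp : List (String × List String)) (start e : ℤ) : Bool :=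
  (PySem.Dict.get? (⟨gp⟩ : PySem.Dict String (List String))
    (String.ofList (PySem.List.slice w (some start) (some e)))).isSome

-- B's sorted distinct key lengths
def pvLengths (gp : List (String × List String)) : List ℤ :=
  PySem.List.sorted
    (PySem.Set.ofList (((gp.map Prod.fst).filter (fun key => !(key == ""))).map
      (fun key => PySem.Str.len key)))
    (fun x => x) false

theorem set_update_ofList (s xs : List String) :
    PySem.Set.update s (PySem.Set.ofList xs) = PySem.Set.update s xs := by
  rw [PySem.Set.update_eq_append_filter, PySem.Set.update_eq_append_filter,
    PySem.Set.ofList_ofList]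

theorem foldl_eq_foldl_filter {α β : Type} (f : β → α → β) (P : α → Bool)
    (h : ∀ acc a, P a = false → f acc a = acc) :
    ∀ (l : List α) (init : β), l.foldl f init = (l.filter P).foldl f init := by
  intro l
  induction l with
  | nil => intro init; rfl
  | cons a t ih =>
    intro init
    cases hP : P a with
    | false => simp [hP, h _ _ hP, ih]
    | true => simp [hP, ih]

theorem pvStep_none {w : List Char} {gp : List (String × List String)} {start e : ℤ}
    (h : pvP w gp start e = false) (output : List String) :
    pvStep w gp start output e = output := by
  unfold pvP at h
  unfold pvStep
  cases hg : PySem.Dict.get? (⟨gp⟩ : PySem.Dict String (List String))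
      (String.ofList (PySem.List.slice w (some start) (some e))) with
  | none => rfl
  | some reps => rw [hg] at h; simp at h

theorem mem_takeWhile_of_sorted {l : List ℤ} (hs : l.Pairwise (· ≤ ·)) {Q : ℤ → Bool}
    (hmono : ∀ a b : ℤ, a ≤ b → Q b = true → Q a = true) {x : ℤ}
    (hx : x ∈ l) (hQ : Q x = true) : x ∈ l.takeWhile Q := by
  induction l with
  | nil => simp at hx
  | cons a t ih =>
    rcases List.mem_cons.1 hx with rfl | hxt
    · rw [List.takeWhile_cons, hQ]; exact List.mem_cons_self
    · have hax : a ≤ x := (List.pairwise_cons.1 hs).1 x hxt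
      have hQa : Q a = true := hmono a x hax hQ
      rw [List.takeWhile_cons, hQa]
      exact List.mem_cons_of_mem a (ih (List.pairwise_cons.1 hs).2 hxt)

theorem eq_of_pairwise_lt_of_mem_iff :
    ∀ {l₁ l₂ : List ℤ}, l₁.Pairwise (· < ·) → l₂.Pairwise (· < ·) →
    (∀ x, x ∈ l₁ ↔ x ∈ l₂) → l₁ = l₂ := by
  intro l₁
  induction l₁ with
  | nil =>
    intro l₂ _ _ hm
    cases l₂ with
    | nil => rfl
    | cons b t => exact absurd ((hm b).2 List.mem_cons_self) (by simp)
  | cons a t ih =>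
    intro l₂ h₁ h₂ hm
    cases l₂ with
    | nil => exact absurd ((hm a).1 List.mem_cons_self) (by simp)
    | cons b t₂ =>
      have hab : a = b := by
        rcases List.mem_cons.1 ((hm a).1 List.mem_cons_self) with h | h
        · exact h
        · have hba : b < a := (List.pairwise_cons.1 h₂).1 a h
          rcases List.mem_cons.1 ((hm b).2 List.mem_cons_self) with h' | h'
          · omega
          · have : a < b := (List.pairwise_cons.1 h₁).1 b h'
            omega
      subst hab
      have ht : t = t₂ := by
        apply ih (List.pairwise_cons.1 h₁).2 (List.pairwise_cons.1 h₂).2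
        intro x
        constructor
        · intro hx
          have hax : a < x := (List.pairwise_cons.1 h₁).1 x hx
          rcases List.mem_cons.1 ((hm x).1 (List.mem_cons_of_mem a hx)) with h | h
          · omega
          · exact h
        · intro hx
          have hax : a < x := (List.pairwise_cons.1 h₂).1 x hx
          rcases List.mem_cons.1 ((hm x).2 (List.mem_cons_of_mem a hx)) with h | h
          · omega
          · exact h
      rw [ht]

-- membership in pvLengths gives a nonempty key of that length
theorem mem_pvLengths {gp : List (String × List String)} {L : ℤ}
    (h : L ∈ pvLengths gp) : 1 ≤ L ∧ ∃ k ∈ gp.map Prod.fst, ¬ k = "" ∧ PySem.Str.len k = L := by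
  unfold pvLengths at h
  rw [PySem.List.mem_sorted, PySem.Set.mem_ofList, List.mem_map] at h
  obtain ⟨k, hk, hLk⟩ := h
  rw [List.mem_filter] at hk
  have hkne : ¬ k = "" := by simpa using hk.2
  refine ⟨?_, k, hk.1, hkne, hLk⟩
  have hlen : k.toList ≠ [] := fun hnil => hkne (by
    have := congrArg String.ofList hnil
    simpa using this)
  have : 1 ≤ k.toList.length := List.length_pos_iff.2 hlen
  rw [← hLk, PySem.Str.len_eq]
  omega

-- a matching key at (start, e) has length e - start, hence e - start ∈ pvLengths
theorem key_mem_pvLengths {w : List Char} {gp : List (String × List String)} {start e : ℤ}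
    (hs0 : 0 ≤ start) (hse : start < e) (hen : e ≤ (w.length : ℤ))
    (hP : pvP w gp start e = true) : e - start ∈ pvLengths gp := by
  unfold pvP at hP
  set key := String.ofList (PySem.List.slice w (some start) (some e)) with hkey
  have hcont : (⟨gp⟩ : PySem.Dict String (List String)).contains key = true := by
    rw [PySem.Dict.contains_eq_isSome_get?]; exact hP
  have hmem : key ∈ gp.map Prod.fst := by
    have := (PySem.Dict.contains_iff_mem_keys (⟨gp⟩ : PySem.Dict String (List String)) key).1 hcont
    simpa [PySem.Dict.keys_mk] using this
  have hslice : PySem.List.slice w (some start) (some e) =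
      (w.drop start.toNat).take (e.toNat - start.toNat) :=
    PySem.List.slice_toNat w hs0 (by omega)
  have hlen : key.toList.length = (e - start).toNat := by
    rw [hkey, String.toList_ofList, hslice]
    simp only [List.length_take, List.length_drop]
    omega
  have hlenpos : 0 < key.toList.length := by omega
  have hkeyne : key ≠ "" := by
    intro h
    rw [h] at hlenpos
    simp at hlenpos
  have hkne : (key == "") = false := beq_eq_false_iff_ne.2 hkeyne
  unfold pvLengths
  rw [PySem.List.mem_sorted, PySem.Set.mem_ofList, List.mem_map]
  refine ⟨key, ?_, ?_⟩
  · rw [List.mem_filter]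
    exact ⟨hmem, by simp [hkne]⟩
  · rw [PySem.Str.len_eq, hlen]; omega

-- the two inner end-position lists agree after filtering by "is a key"
theorem inner_lists_eq (w : List Char) (gp : List (String × List String)) (start : ℤ)
    (hs0 : 0 ≤ start) :
    (((PySem.List.pyRange 0 (w.length : ℤ) 1).filter (fun i => decide (start ≤ i))).map
        (fun i => i + 1)).filter (pvP w gp start)
    = ((( pvLengths gp).takeWhile (fun L => decide (start + L ≤ (w.length : ℤ)))).map
        (fun L => start + L)).filter (pvP w gp start) := by
  have hlenpair : (pvLengths gp).Pairwise (· < ·) := by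
    unfold pvLengths
    exact PySem.List.sorted_ofList_pairwise_lt _
  apply eq_of_pairwise_lt_of_mem_iff
  · refine List.Pairwise.filter _ (List.pairwise_map.2 ?_)
    refine List.Pairwise.imp ?_
      (List.Pairwise.filter _ (PySem.List.pairwise_lt_pyRange_one 0 (w.length : ℤ)))
    intro a b h
    omega
  · refine List.Pairwise.filter _ (List.pairwise_map.2 ?_)
    refine List.Pairwise.imp ?_
      (List.Pairwise.sublist (List.takeWhile_sublist _) hlenpair)
    intro a b h
    omega
  · intro e
    simp only [List.mem_filter, List.mem_map, PySem.List.mem_pyRange_one, decide_eq_true_eq]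
    constructor
    · rintro ⟨⟨i, ⟨⟨h0i, hin⟩, hsi⟩, rfl⟩, hP⟩
      refine ⟨⟨i + 1 - start, ?_, by omega⟩, hP⟩
      apply mem_takeWhile_of_sorted (hlenpair.imp (fun h => le_of_lt h))
      · intro a b hab hQb
        simp only [decide_eq_true_eq] at *
        omega
      · have := key_mem_pvLengths hs0 (show start < i + 1 by omega)
          (show (i : ℤ) + 1 ≤ (w.length : ℤ) by omega) hP
        simpa using this
      · simp only [decide_eq_true_eq]; omega
    · rintro ⟨⟨L, hLtw, rfl⟩, hP⟩
      have hLmem : L ∈ pvLengths gp := List.Sublist.mem hLtw (List.takeWhile_sublist _)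
      have hQ : start + L ≤ (w.length : ℤ) := by
        have := List.mem_takeWhile_imp hLtw
        simpa using this
      have hL1 : 1 ≤ L := (mem_pvLengths hLmem).1
      exact ⟨⟨start + L - 1, ⟨⟨by omega, by omega⟩, by omega⟩, by omega⟩, hP⟩

-- ===== VERDICT (by name: the statement is the Claim_ definition above) =====
theorem apply_grouped_productions_to_word_spec : Claim_equal_apply_grouped_productions_to_word := by
  intro word gp _hdom
  unfold Spec_apply_grouped_productions_to_word
  unfold apply_grouped_productions_to_word apply_grouped_productions_to_word_alt
  simp only [PySem.Str.len_eq]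
  apply PySem.List.foldl_congr_mem
  intro acc start hstart
  rw [PySem.List.mem_pyRange_one] at hstart
  -- A's inner body is pvStep
  have hbodyA : ∀ (out : List String) (e : ℤ),
      (fun (output : List String) (end_ : ℤ) =>
        match PySem.Dict.get? (⟨gp⟩ : PySem.Dict String (List String))
            (String.ofList (PySem.List.slice word.toList (some start) (some end_))) with
        | some reps =>
            PySem.Set.update output (PySem.Set.ofList (reps.map (fun replacement =>
              String.ofList (PySem.List.slice word.toList none (some start) ++ replacement.toList ++
                PySem.List.slice word.toList (some end_) none))))
        | none => output) out e = pvStep word.toList gp start out e := by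
    intro out e
    unfold pvStep
    beta_reduce
    cases hg : PySem.Dict.get? (⟨gp⟩ : PySem.Dict String (List String))
        (String.ofList (PySem.List.slice word.toList (some start) (some e))) with
    | none => rfl
    | some reps =>
      dsimp only
      rw [set_update_ofList, PySem.Set.update_map_eq_foldl_add]
  calc
    _ = (((PySem.List.pyRange 0 (word.toList.length : ℤ) 1).filter
            (fun index => decide (start ≤ index))).map (fun index => index + 1)).foldl
          (pvStep word.toList gp start) acc := by
        apply PySem.List.foldl_congr_mem
        intro out e _
        exact hbodyA out e
    _ = ((((PySem.List.pyRange 0 (word.toList.length : ℤ) 1).filter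
            (fun index => decide (start ≤ index))).map (fun index => index + 1)).filter
          (pvP word.toList gp start)).foldl (pvStep word.toList gp start) acc := by
        exact foldl_eq_foldl_filter _ _ (fun acc' e h => pvStep_none h acc') _ acc
    _ = ((((pvLengths gp).takeWhile (fun L => decide (start + L ≤ (word.toList.length : ℤ)))).map
          (fun L => start + L)).filter (pvP word.toList gp start)).foldl
          (pvStep word.toList gp start) acc := by
        rw [inner_lists_eq word.toList gp start hstart.1]
    _ = (((pvLengths gp).takeWhile (fun L => decide (start + L ≤ (word.toList.length : ℤ)))).map
          (fun L => start + L)).foldl (pvStep word.toList gp start) acc := by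
        exact (foldl_eq_foldl_filter _ _ (fun acc' e h => pvStep_none h acc') _ acc).symm
    _ = _ := by
        rw [List.foldl_map]
        rfl
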